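-- pv_equiv track=rewrite | github.com/JFF-Bohdan/sim-module | lib/sim900/gsm.py | getLastNonEmptyString
-- ===== SOURCE A (Python) =====
-- def getLastNonEmptyString(strings):
--     """
--     Parses strings array and returns last non empty string from array
--
--     :param strings: strings array for analysis
--     :return: last non empty string, otherwise None
--     """
--
--     #if there is no data - returning None
--     if strings is None:
--         return None
--
--     qty = len(strings)
--     if qty == 0:
--         return None
--
--     #looking for last non empty string
--     for i in range(qty):
--         s = str(strings[-(i+1)]).strip()
--         if len(s) > 0:
--             return s
--
--     return None
-- ===== SOURCE B (Python) =====
-- def getLastNonEmptyString(strings):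
--     if strings is None:
--         return None
--     if len(strings) == 0:
--         return None
--     result = None
--     for x in strings:
--         s = str(x).strip()
--         if len(s) > 0:
--             result = s
--     return result
-- ===== Notes on version B (the rewrite author's own statement) =====
-- stated objective: simpler
-- what changed: Replaces the reverse index scan with early return by a single forward pass that keeps the last non-empty stripped string in an accumulator.
import Mathlib
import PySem

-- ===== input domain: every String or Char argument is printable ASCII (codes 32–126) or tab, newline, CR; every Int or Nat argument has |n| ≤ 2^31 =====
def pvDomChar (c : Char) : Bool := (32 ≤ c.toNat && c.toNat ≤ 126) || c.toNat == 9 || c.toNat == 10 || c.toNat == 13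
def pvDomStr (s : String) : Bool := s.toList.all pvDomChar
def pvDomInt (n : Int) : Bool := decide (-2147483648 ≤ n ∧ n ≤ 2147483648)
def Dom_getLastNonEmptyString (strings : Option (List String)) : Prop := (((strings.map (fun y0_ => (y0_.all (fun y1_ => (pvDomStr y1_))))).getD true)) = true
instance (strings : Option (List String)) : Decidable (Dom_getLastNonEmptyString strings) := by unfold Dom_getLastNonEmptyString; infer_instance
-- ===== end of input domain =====

-- B changes the decomposition only (forward accumulator pass instead of reverse scan with early return); same cost.

-- ===== PORT A =====
-- the 'for i in range(qty)' loop with its early return, iterating the remaining index list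
def getLastNonEmptyStringLoopA (xs : List String) : List Int → Option String
  | [] => none
  | i :: rest =>
      let s := PySem.Str.strip (PySem.List.pyGetD xs (-(i+1)) "")
      if 0 < PySem.Str.len s then some s else getLastNonEmptyStringLoopA xs rest

def getLastNonEmptyString (strings : Option (List String)) : Option String :=
  match strings with
  | none => none
  | some xs =>
      let qty := PySem.List.len xs
      if qty = 0 then none
      else getLastNonEmptyStringLoopA xs (PySem.List.pyRange 0 qty 1)

-- ===== PORT B =====
def getLastNonEmptyString_alt (strings : Option (List String)) : Option String :=
  match strings with
  | none => none
  | some xs =>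
      if PySem.List.len xs = 0 then none
      else xs.foldl (fun result x =>
        let s := PySem.Str.strip x
        if 0 < PySem.Str.len s then some s else result) none

-- ===== PRECONDITION & SPEC =====
def Spec_getLastNonEmptyString (strings : Option (List String)) (out : Option String) : Prop := out = getLastNonEmptyString_alt strings
instance (strings : Option (List String)) (out : Option String) : Decidable (Spec_getLastNonEmptyString strings out) := by unfold Spec_getLastNonEmptyString; infer_instance

-- ===== CLAIM (what is proved, stated in full; the proofs are below) =====
def Claim_equal_getLastNonEmptyString : Prop := ∀ (strings : Option (List String)), Dom_getLastNonEmptyString strings → Spec_getLastNonEmptyString strings (getLastNonEmptyString strings)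

-- ===== LEMMAS AND PROOFS =====

-- reference form: first string in the list whose strip is non-empty (applied to xs.reverse below)
def pvFirstStripped : List String → Option String
  | [] => none
  | v :: rest =>
      let s := PySem.Str.strip v
      if 0 < PySem.Str.len s then some s else pvFirstStripped rest

theorem pvLoopA_eq (xs : List String) : ∀ (m k : Nat), k + m = xs.length →
    getLastNonEmptyStringLoopA xs (PySem.List.pyRange (k : Int) (PySem.List.len xs) 1)
      = pvFirstStripped (xs.reverse.drop k) := by
  intro m
  induction m with
  | zero =>
      intro k hk
      rw [PySem.List.pyRange_one_eq_nil (by simp; omega)]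
      have hd : xs.reverse.drop k = [] := List.drop_eq_nil_of_le (by simp; omega)
      rw [hd]; rfl
  | succ m ih =>
      intro k hk
      rw [PySem.List.pyRange_one_cons (by simp [PySem.List.len]; omega)]
      have hkl : k < xs.length := by omega
      have hget : PySem.List.pyGetD xs (-((k : Int)+1)) "" = xs[xs.length - (k+1)] := by
        have := PySem.List.pyGetD_neg_natCast (xs := xs) (k := k+1) (d := "")
          (by omega) (by simp; omega)
        simpa [Nat.cast_add] using this
      have hdrop : xs.reverse.drop k = xs[xs.length - (k+1)] :: xs.reverse.drop (k+1) := by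
        have hk' : k < xs.reverse.length := by simpa using hkl
        rw [List.drop_eq_getElem_cons hk']
        congr 1
        · rw [List.getElem_reverse]
          congr 1; omega
      rw [hdrop]
      have ih' := ih (k+1) (by omega)
      simp only [getLastNonEmptyStringLoopA, pvFirstStripped, hget]
      rw [show ((k : Int) + 1) = ((k+1 : Nat) : Int) by push_cast; ring]
      rw [ih']

theorem pvFoldl_eq (xs : List String) : ∀ (acc : Option String),
    xs.foldl (fun result x =>
        let s := PySem.Str.strip x
        if 0 < PySem.Str.len s then some s else result) acc
      = (match pvFirstStripped xs.reverse with | some s => some s | none => acc) := by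
  induction xs using List.reverseRecOn with
  | nil => intro acc; simp [pvFirstStripped]
  | append_singleton ys y ih =>
      intro acc
      rw [List.foldl_append]
      simp only [List.foldl_cons, List.foldl_nil, List.reverse_append, List.reverse_cons,
        List.reverse_nil, List.nil_append, List.cons_append, pvFirstStripped]
      split_ifs with h
      · rfl
      · exact ih acc

-- ===== VERDICT (by name: the statement is the Claim_ definition above) =====
theorem getLastNonEmptyString_spec : Claim_equal_getLastNonEmptyString := by
  intro strings _
  unfold Spec_getLastNonEmptyString getLastNonEmptyString getLastNonEmptyString_alt
  cases strings with
  | none => rfl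
  | some xs =>
      simp only
      split_ifs with h
      · rfl
      · have hA := pvLoopA_eq xs xs.length 0 (by omega)
        rw [show ((0 : Nat) : Int) = (0 : Int) from rfl, List.drop_zero] at hA
        rw [hA, pvFoldl_eq xs none]
        cases pvFirstStripped xs.reverse <;> rfl
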